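-- pv_equiv track=rewrite | github.com/fengfeng225/wxshuabushu | mimotion/main.py | _get_cron_last_minutes
-- ===== SOURCE A (Python) =====
-- def _parse_cron_field(field, min_value, max_value):
--     field = str(field or "").strip()
--     if field in ("*", "?"):
--         return list(range(min_value, max_value + 1))
--     values = set()
--     for part in field.split(","):
--         part = part.strip()
--         if not part:
--             continue
--         step = 1
--         if "/" in part:
--             base, step_str = part.split("/", 1)
--             try:
--                 step = int(step_str)
--             except Exception:
--                 continue
--         else:
--             base = part
--         if base in ("*", "?") or base == "":
--             start, end = min_value, max_value
--         elif "-" in base: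
--             try:
--                 start_str, end_str = base.split("-", 1)
--                 start, end = int(start_str), int(end_str)
--             except Exception:
--                 continue
--         else:
--             try:
--                 start = end = int(base)
--             except Exception:
--                 continue
--         start = max(min_value, start)
--         end = min(max_value, end)
--         if step <= 0:
--             step = 1
--         for value in range(start, end + 1, step):
--             values.add(value)
--     return sorted(v for v in values if min_value <= v <= max_value)
--
-- def _get_cron_last_minutes(expression):
--     if not expression:
--         return 22 * 60
--     parts = str(expression).split()
--     if len(parts) < 2:
--         return 22 * 60
--     minutes = _parse_cron_field(parts[0], 0, 59)
--     hours = _parse_cron_field(parts[1], 0, 23)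
--     if not minutes or not hours:
--         return 22 * 60
--     return max(hour * 60 + minute for hour in hours for minute in minutes)
-- ===== SOURCE B (Python) =====
-- def _part_spec(part, lo, hi):
--     """(start, end, step) described by one comma-part, clamped to [lo, hi]; None if unparsable."""
--     part = part.strip()
--     if not part:
--         return None
--     step = 1
--     if "/" in part:
--         base, step_str = part.split("/", 1)
--         try:
--             step = int(step_str)
--         except Exception:
--             return None
--     else:
--         base = part
--     if base in ("*", "?") or base == "":
--         start, end = lo, hi
--     elif "-" in base:
--         try:
--             a, b = base.split("-", 1)
--             start, end = int(a), int(b)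
--         except Exception:
--             return None
--     else:
--         try:
--             start = end = int(base)
--         except Exception:
--             return None
--     return (max(lo, start), min(hi, end), step if step > 0 else 1)
--
-- def _field_matches(field, value, lo, hi):
--     """Does the (already stripped) cron field match this value?"""
--     if field in ("*", "?"):
--         return lo <= value <= hi
--     for part in field.split(","):
--         spec = _part_spec(part, lo, hi)
--         if spec is not None:
--             start, end, step = spec
--             if start <= value <= end and (value - start) % step == 0:
--                 return True
--     return False
--
-- def _latest_match(field, lo, hi):
--     """Largest value in [lo, hi] the field matches, scanning downward; None if no match."""
--     field = str(field or "").strip()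
--     value = hi
--     while value >= lo:
--         if _field_matches(field, value, lo, hi):
--             return value
--         value -= 1
--     return None
--
-- def _get_cron_last_minutes(expression):
--     if not expression:
--         return 22 * 60
--     parts = str(expression).split()
--     if len(parts) < 2:
--         return 22 * 60
--     minute = _latest_match(parts[0], 0, 59)
--     hour = _latest_match(parts[1], 0, 23)
--     if minute is None or hour is None:
--         return 22 * 60
--     return hour * 60 + minute
-- ===== Notes on version B (the rewrite author's own statement) =====
-- stated objective: alternative
-- what changed: Instead of enumerating every matched value of each cron field into a set, sorting it, and maximizing over the full hour-by-minute cross product, B parses each comma-part once into a clamped (start, end, step) spec, tests membership of a single value arithmetically (start <= v <= end and (v - start) % step == 0), and scans each field's range downward from the top, returning the first matching value as the latest one; the answer is then hour * 60 + minute.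
import Mathlib
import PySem

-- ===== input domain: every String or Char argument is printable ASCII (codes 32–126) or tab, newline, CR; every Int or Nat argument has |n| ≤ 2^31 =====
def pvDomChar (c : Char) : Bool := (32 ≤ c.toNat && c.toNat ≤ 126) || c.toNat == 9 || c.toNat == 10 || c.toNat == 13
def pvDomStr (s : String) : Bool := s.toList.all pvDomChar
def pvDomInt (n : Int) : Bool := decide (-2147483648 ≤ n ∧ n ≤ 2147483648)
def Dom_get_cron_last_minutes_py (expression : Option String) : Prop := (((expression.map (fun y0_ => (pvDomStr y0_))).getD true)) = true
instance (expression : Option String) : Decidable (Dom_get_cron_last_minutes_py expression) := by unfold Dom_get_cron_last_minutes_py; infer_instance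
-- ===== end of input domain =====

-- B replaces A's per-part value-set enumeration, sort and hour×minute cross-product max
-- by a downward scan of each field's range with a per-value membership test (objective: alternative).

-- ===== PORT A =====
-- one iteration of A's 'for part in field.split(",")' loop body
def pvProcessPart (values : PySem.Set Int) (part : String) (minValue maxValue : Int) : PySem.Set Int :=
  let part := PySem.Str.strip part
  if part = "" then values
  else
    -- step = 1; if "/" in part: base, step = part.split("/", 1) with int(step) (continue on ValueError)
    let baseStep : Option (String × Int) :=
      if PySem.Str.isIn "/" part then
        match (PySem.Str.splitMax? part "/" 1).getD [] with
        | [base, stepStr] =>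
          match PySem.Int.ofStr? stepStr with
          | some st => some (base, st)
          | none => none
        | _ => none            -- unreachable: split with maxsplit 1 on a present separator gives 2 pieces
      else some (part, 1)
    match baseStep with
    | none => values
    | some (base, step) =>
      let startEnd : Option (Int × Int) :=
        if base = "*" ∨ base = "?" ∨ base = "" then some (minValue, maxValue)
        else if PySem.Str.isIn "-" base then
          match (PySem.Str.splitMax? base "-" 1).getD [] with
          | [startStr, endStr] =>
            match PySem.Int.ofStr? startStr, PySem.Int.ofStr? endStr with
            | some s, some e => some (s, e)
            | _, _ => none
          | _ => none          -- unreachable, as above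
        else
          match PySem.Int.ofStr? base with
          | some v => some (v, v)
          | none => none
      match startEnd with
      | none => values
      | some (start, end_) =>
        let start := max minValue start
        let end_ := min maxValue end_
        let step := if step ≤ 0 then 1 else step
        (PySem.List.pyRange start (end_ + 1) step).foldl PySem.Set.add values

def pvParseCronField (field : String) (minValue maxValue : Int) : List Int :=
  let field := PySem.Str.strip (if field = "" then "" else field)   -- str(field or "").strip()
  if field = "*" ∨ field = "?" then PySem.List.pyRange minValue (maxValue + 1) 1
  else
    let values := ((PySem.Str.split? field ",").getD []).foldl
      (fun values part => pvProcessPart values part minValue maxValue) PySem.Set.empty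
    PySem.List.sorted (values.filter fun v => decide (minValue ≤ v ∧ v ≤ maxValue)) (fun x => x) false

def get_cron_last_minutes_py (expression : Option String) : Int :=
  match expression with
  | none => 22 * 60
  | some s =>
    if s = "" then 22 * 60
    else
      let parts := PySem.Str.split₀ s
      if parts.length < 2 then 22 * 60
      else
        let minutes := pvParseCronField (PySem.List.pyGetD parts 0 "") 0 59
        let hours := pvParseCronField (PySem.List.pyGetD parts 1 "") 0 23
        if minutes = [] ∨ hours = [] then 22 * 60
        else
          -- max(hour * 60 + minute for hour in hours for minute in minutes); guarded nonempty, getD totalizes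
          (PySem.List.max? (hours.flatMap fun hour => minutes.map fun minute => hour * 60 + minute)
            (fun x => x)).getD 0

-- ===== PORT B =====
-- (start, end, step) triple described by one comma-part, clamped to [lo, hi]; none if unparsable
def pvPartSpec (part : String) (lo hi : Int) : Option (Int × Int × Int) :=
  let p := PySem.Str.strip part
  if p = "" then none
  else
    (if PySem.Str.isIn "/" p then
        match (PySem.Str.splitMax? p "/" 1).getD [] with
        | [base, stepStr] => (PySem.Int.ofStr? stepStr).map (fun st => (base, st))
        | _ => none            -- unreachable: split with maxsplit 1 on a present separator gives 2 pieces
      else some (p, 1)).bind fun bs =>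
      (if bs.1 = "*" ∨ bs.1 = "?" ∨ bs.1 = "" then some (lo, hi)
        else if PySem.Str.isIn "-" bs.1 then
          match (PySem.Str.splitMax? bs.1 "-" 1).getD [] with
          | [aStr, bStr] => (PySem.Int.ofStr? aStr).bind fun a =>
              (PySem.Int.ofStr? bStr).map fun b => (a, b)
          | _ => none          -- unreachable, as above
        else (PySem.Int.ofStr? bs.1).map fun n => (n, n)).map fun se =>
      (max lo se.1, min hi se.2, if bs.2 > 0 then bs.2 else 1)

-- loop body of B's 'for part in field.split(","): … return True'
def pvPartMatch (part : String) (value lo hi : Int) : Bool :=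
  match pvPartSpec part lo hi with
  | some (start, end_, step) =>
      decide (start ≤ value ∧ value ≤ end_) && (PySem.Int.mod (value - start) step == 0)
  | none => false

def pvFieldMatches (field : String) (value lo hi : Int) : Bool :=
  if field = "*" ∨ field = "?" then decide (lo ≤ value ∧ value ≤ hi)
  else ((PySem.Str.split? field ",").getD []).any fun part => pvPartMatch part value lo hi

-- B's 'while value >= lo' downward scan
def pvLatestLoop (field : String) (lo hi value : Int) : Option Int :=
  if h : value < lo then none
  else if pvFieldMatches field value lo hi then some value
  else pvLatestLoop field lo hi (value - 1)
termination_by (value - lo + 1).toNat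
decreasing_by omega

def pvLatestMatch (field : String) (lo hi : Int) : Option Int :=
  pvLatestLoop (PySem.Str.strip (if field = "" then "" else field)) lo hi hi

def get_cron_last_minutes_py_alt (expression : Option String) : Int :=
  match expression with
  | none => 22 * 60
  | some s =>
    if s = "" then 22 * 60
    else
      let parts := PySem.Str.split₀ s
      if parts.length < 2 then 22 * 60
      else
        match pvLatestMatch (PySem.List.pyGetD parts 0 "") 0 59,
              pvLatestMatch (PySem.List.pyGetD parts 1 "") 0 23 with
        | some minute, some hour => hour * 60 + minute
        | _, _ => 22 * 60

-- ===== PRECONDITION & SPEC =====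
def Spec_get_cron_last_minutes_py (expression : Option String) (out : Int) : Prop := out = get_cron_last_minutes_py_alt expression
instance (expression : Option String) (out : Int) : Decidable (Spec_get_cron_last_minutes_py expression out) := by unfold Spec_get_cron_last_minutes_py; infer_instance

-- ===== CLAIM (what is proved, stated in full; the proofs are below) =====
def Claim_equal_get_cron_last_minutes_py : Prop := ∀ (expression : Option String), Dom_get_cron_last_minutes_py expression → Spec_get_cron_last_minutes_py expression (get_cron_last_minutes_py expression)

-- ===== LEMMAS AND PROOFS =====

-- proof-only restatements of the shared part-parsing cascade
def pvBaseStep (part : String) : Option (String × Int) :=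
  if PySem.Str.isIn "/" part then
    match (PySem.Str.splitMax? part "/" 1).getD [] with
    | [base, stepStr] =>
      match PySem.Int.ofStr? stepStr with
      | some st => some (base, st)
      | none => none
    | _ => none
  else some (part, 1)

def pvStartEnd (base : String) (minValue maxValue : Int) : Option (Int × Int) :=
  if base = "*" ∨ base = "?" ∨ base = "" then some (minValue, maxValue)
  else if PySem.Str.isIn "-" base then
    match (PySem.Str.splitMax? base "-" 1).getD [] with
    | [startStr, endStr] =>
      match PySem.Int.ofStr? startStr, PySem.Int.ofStr? endStr with
      | some s, some e => some (s, e)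
      | _, _ => none
    | _ => none
  else
    match PySem.Int.ofStr? base with
    | some v => some (v, v)
    | none => none

theorem pvProcessPart_eq (values : PySem.Set Int) (part : String) (lo hi : Int) :
    pvProcessPart values part lo hi =
      (if PySem.Str.strip part = "" then values
       else
         match pvBaseStep (PySem.Str.strip part) with
         | none => values
         | some (base, step) =>
           match pvStartEnd base lo hi with
           | none => values
           | some (start, end_) =>
             (PySem.List.pyRange (max lo start) (min hi end_ + 1)
               (if step ≤ 0 then 1 else step)).foldl PySem.Set.add values) := by
  unfold pvProcessPart pvBaseStep pvStartEnd
  rfl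

theorem pv_bs_eq (p : String) :
    (if PySem.Str.isIn "/" p then
        match (PySem.Str.splitMax? p "/" 1).getD [] with
        | [base, stepStr] => (PySem.Int.ofStr? stepStr).map (fun st => (base, st))
        | _ => none
      else some (p, 1)) = pvBaseStep p := by
  unfold pvBaseStep
  split
  · split
    · cases PySem.Int.ofStr? _ <;> rfl
    · rfl
  · rfl

theorem pv_se_eq (base : String) (lo hi : Int) :
    (if base = "*" ∨ base = "?" ∨ base = "" then some (lo, hi)
      else if PySem.Str.isIn "-" base then
        match (PySem.Str.splitMax? base "-" 1).getD [] with
        | [aStr, bStr] => (PySem.Int.ofStr? aStr).bind fun a =>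
            (PySem.Int.ofStr? bStr).map fun b => (a, b)
        | _ => none
      else (PySem.Int.ofStr? base).map fun n => (n, n)) = pvStartEnd base lo hi := by
  unfold pvStartEnd
  split
  · rfl
  · split
    · split
      · cases PySem.Int.ofStr? _ <;> cases PySem.Int.ofStr? _ <;> rfl
      · rfl
    · cases PySem.Int.ofStr? base <;> rfl

theorem pvPartSpec_eq (part : String) (lo hi : Int) :
    pvPartSpec part lo hi =
      (if PySem.Str.strip part = "" then none
       else
         match pvBaseStep (PySem.Str.strip part) with
         | none => none
         | some (base, step) =>
           match pvStartEnd base lo hi with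
           | none => none
           | some (start, end_) =>
             some (max lo start, min hi end_, if step ≤ 0 then 1 else step)) := by
  have hstep : ∀ st : Int, (if st > 0 then st else 1) = (if st ≤ 0 then 1 else st) := by
    intro st; split_ifs <;> omega
  rw [show pvPartSpec part lo hi =
      (if PySem.Str.strip part = "" then none
       else (pvBaseStep (PySem.Str.strip part)).bind fun bs =>
         (pvStartEnd bs.1 lo hi).map fun se =>
           (max lo se.1, min hi se.2, if bs.2 > 0 then bs.2 else 1)) from by
    show (if PySem.Str.strip part = "" then none
       else
         (if PySem.Str.isIn "/" (PySem.Str.strip part) then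
             match (PySem.Str.splitMax? (PySem.Str.strip part) "/" 1).getD [] with
             | [base, stepStr] => (PySem.Int.ofStr? stepStr).map (fun st => (base, st))
             | _ => none
           else some (PySem.Str.strip part, 1)).bind fun bs =>
           (if bs.1 = "*" ∨ bs.1 = "?" ∨ bs.1 = "" then some (lo, hi)
             else if PySem.Str.isIn "-" bs.1 then
               match (PySem.Str.splitMax? bs.1 "-" 1).getD [] with
               | [aStr, bStr] => (PySem.Int.ofStr? aStr).bind fun a =>
                   (PySem.Int.ofStr? bStr).map fun b => (a, b)
               | _ => none
             else (PySem.Int.ofStr? bs.1).map fun n => (n, n)).map fun se =>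
           (max lo se.1, min hi se.2, if bs.2 > 0 then bs.2 else 1)) = _
    rw [pv_bs_eq]
    by_cases hp : PySem.Str.strip part = ""
    · simp [hp]
    · rw [if_neg hp, if_neg hp]
      cases pvBaseStep (PySem.Str.strip part) with
      | none => rfl
      | some bs => rw [Option.bind_some, Option.bind_some, pv_se_eq]]
  by_cases hp : PySem.Str.strip part = ""
  · simp [hp]
  · rw [if_neg hp, if_neg hp]
    cases pvBaseStep (PySem.Str.strip part) with
    | none => rfl
    | some bs =>
      obtain ⟨base, step⟩ := bs
      rw [Option.bind_some]
      cases hse : pvStartEnd base lo hi with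
      | none => simp [hse]
      | some se =>
        obtain ⟨s, e⟩ := se
        simp [hse, hstep step]

-- max? with the identity key is determined by membership (its value is the unique maximum)
theorem pv_max?_id_eq_some_iff (xs : List Int) (m : Int) :
    PySem.List.max? xs (fun x => x) = some m ↔ m ∈ xs ∧ ∀ y ∈ xs, y ≤ m := by
  constructor
  · intro h
    exact ⟨PySem.List.max?_mem h, fun y hy => PySem.List.max?_isMax h y hy⟩
  · rintro ⟨hm, hmax⟩
    cases hmx : PySem.List.max? xs (fun x => x) with
    | none =>
      rw [PySem.List.max?_eq_none_iff] at hmx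
      simp [hmx] at hm
    | some m' =>
      have h1 : m ≤ m' := PySem.List.max?_isMax hmx m hm
      have h2 : m' ≤ m := hmax m' (PySem.List.max?_mem hmx)
      rw [le_antisymm h1 h2]

-- one comma-part: membership in A's accumulated set vs B's boolean test, plus the bounds invariant
theorem pv_part_mem (values : PySem.Set Int) (part : String) (lo hi v : Int) :
    (v ∈ pvProcessPart values part lo hi ↔ v ∈ values ∨ pvPartMatch part v lo hi = true)
    ∧ (pvPartMatch part v lo hi = true → lo ≤ v ∧ v ≤ hi) := by
  unfold pvPartMatch
  rw [pvProcessPart_eq, pvPartSpec_eq]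
  by_cases hp : PySem.Str.strip part = ""
  · simp [hp]
  · rw [if_neg hp, if_neg hp]
    cases hbs : pvBaseStep (PySem.Str.strip part) with
    | none => simp
    | some bs =>
      obtain ⟨base, step⟩ := bs
      cases hse : pvStartEnd base lo hi with
      | none => simp [hse]
      | some se =>
        obtain ⟨start, end_⟩ := se
        simp only [hse]
        set start' := max lo start with hstart'
        set end' := min hi end_ with hend'
        set step' := (if step ≤ 0 then 1 else step) with hstep'
        have hs : 0 < step' := by rw [hstep']; split <;> omega
        have hmem : v ∈ (PySem.List.pyRange start' (end' + 1) step').foldl PySem.Set.add values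
            ↔ v ∈ values ∨ v ∈ PySem.List.pyRange start' (end' + 1) step' := by
          have := PySem.Set.mem_foldl_add (PySem.List.pyRange start' (end' + 1) step')
            (fun x => x) values v
          simpa using this
        have hrng : v ∈ PySem.List.pyRange start' (end' + 1) step' ↔
            (decide (start' ≤ v ∧ v ≤ end') && (PySem.Int.mod (v - start') step' == 0)) = true := by
          rw [PySem.List.mem_pyRange_iff_of_pos hs]
          simp only [Bool.and_eq_true, decide_eq_true_eq, beq_iff_eq]
          rw [PySem.Int.mod_eq_zero_iff_dvd]
          constructor
          · rintro ⟨h1, h2, k, hk⟩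
            exact ⟨⟨h1, by omega⟩, ⟨k, by omega⟩⟩
          · rintro ⟨⟨h1, h2⟩, k, hk⟩
            exact ⟨h1, by omega, k, by omega⟩
        constructor
        · rw [hmem, hrng]
        · intro h
          simp only [Bool.and_eq_true, decide_eq_true_eq] at h
          omega

-- the whole part loop: membership in the folded set is 'some part matches'
theorem pv_fold_mem (ps : List String) (lo hi v : Int) : ∀ values : PySem.Set Int,
    (v ∈ ps.foldl (fun vs p => pvProcessPart vs p lo hi) values ↔
      v ∈ values ∨ (ps.any fun p => pvPartMatch p v lo hi) = true) := by
  induction ps with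
  | nil => intro values; simp
  | cons p ps ih =>
    intro values
    simp only [List.foldl_cons, List.any_cons, Bool.or_eq_true]
    rw [ih, (pv_part_mem values p lo hi v).1]
    tauto

-- field level: membership in A's sorted list is B's membership test (within bounds)
theorem pv_field_mem (field : String) (lo hi v : Int) :
    v ∈ pvParseCronField field lo hi ↔
      (pvFieldMatches (PySem.Str.strip (if field = "" then "" else field)) v lo hi = true
        ∧ lo ≤ v ∧ v ≤ hi) := by
  unfold pvParseCronField pvFieldMatches
  set f := PySem.Str.strip (if field = "" then "" else field) with hf
  by_cases hstar : f = "*" ∨ f = "?"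
  · rw [if_pos hstar, if_pos hstar, PySem.List.mem_pyRange_one]
    simp only [decide_eq_true_eq]
    omega
  · rw [if_neg hstar, if_neg hstar]
    rw [PySem.List.mem_sorted, List.mem_filter]
    rw [pv_fold_mem]
    simp only [PySem.Set.empty, List.not_mem_nil, false_or, decide_eq_true_eq]

-- the downward scan returns none when nothing in [lo, v] matches
theorem pvLatestLoop_none (f : String) (lo hi : Int) : ∀ v : Int,
    (∀ u, lo ≤ u → u ≤ v → pvFieldMatches f u lo hi = false) → pvLatestLoop f lo hi v = none := by
  intro v
  induction v using pvLatestLoop.induct f lo hi with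
  | case1 v h => intro _; rw [pvLatestLoop]; simp [h]
  | case2 v h hm =>
    intro hall
    have hfalse := hall v (by omega) (by omega)
    simp [hm] at hfalse
  | case3 v h hm ih =>
    intro hall
    rw [pvLatestLoop, dif_neg h, if_neg hm]
    exact ih (fun u h1 h2 => hall u h1 (by omega))

-- the downward scan finds exactly the greatest matching value
theorem pvLatestLoop_some (f : String) (lo hi : Int) (w : Int)
    (hw : pvFieldMatches f w lo hi = true) (hlo : lo ≤ w) : ∀ v : Int, w ≤ v →
    (∀ u, w < u → u ≤ v → pvFieldMatches f u lo hi = false) → pvLatestLoop f lo hi v = some w := by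
  intro v
  induction v using pvLatestLoop.induct f lo hi with
  | case1 v h => intro h1 _; omega
  | case2 v h hm =>
    intro h1 hall
    rcases lt_or_eq_of_le h1 with h2 | h2
    · have hfalse := hall v h2 (le_refl v)
      simp [hm] at hfalse
    · rw [pvLatestLoop, dif_neg h, if_pos hm, h2]
  | case3 v h hm ih =>
    intro h1 hall
    have hwv : w < v := by
      rcases lt_or_eq_of_le h1 with h2 | h2
      · exact h2
      · exfalso; apply hm; rw [← h2]; exact hw
    rw [pvLatestLoop, dif_neg h, if_neg hm]
    exact ih (by omega) (fun u hu1 hu2 => hall u hu1 (by omega))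

-- per field: the max of A's value list is B's downward-scan result
theorem pv_field (field : String) (lo hi : Int) :
    PySem.List.max? (pvParseCronField field lo hi) (fun x => x) = pvLatestMatch field lo hi := by
  unfold pvLatestMatch
  set f := PySem.Str.strip (if field = "" then "" else field) with hf
  cases hm : PySem.List.max? (pvParseCronField field lo hi) (fun x => x) with
  | none =>
    rw [PySem.List.max?_eq_none_iff] at hm
    symm
    apply pvLatestLoop_none
    intro u h1 h2
    by_contra hc
    have hu : pvFieldMatches f u lo hi = true := by
      cases h : pvFieldMatches f u lo hi
      · exact absurd h hc
      · rfl
    have : u ∈ pvParseCronField field lo hi := (pv_field_mem field lo hi u).2 ⟨hu, h1, h2⟩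
    rw [hm] at this
    simp at this
  | some m =>
    obtain ⟨hmem, hmax⟩ := (pv_max?_id_eq_some_iff _ m).1 hm
    obtain ⟨hmatch, hlo, hhi⟩ := (pv_field_mem field lo hi m).1 hmem
    symm
    apply pvLatestLoop_some f lo hi m hmatch hlo hi hhi
    intro u hu1 hu2
    by_contra hc
    have hu : pvFieldMatches f u lo hi = true := by
      cases h : pvFieldMatches f u lo hi
      · exact absurd h hc
      · rfl
    have : u ∈ pvParseCronField field lo hi :=
      (pv_field_mem field lo hi u).2 ⟨hu, by omega, hu2⟩
    have := hmax u this
    omega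

-- max over the hour×minute product is max(hours)*60 + max(minutes)
theorem pv_flat_max (hours minutes : List Int) (H M : Int)
    (hH : PySem.List.max? hours (fun x => x) = some H)
    (hM : PySem.List.max? minutes (fun x => x) = some M) :
    PySem.List.max? (hours.flatMap fun hour => minutes.map fun minute => hour * 60 + minute)
      (fun x => x) = some (H * 60 + M) := by
  obtain ⟨hHm, hHb⟩ := (pv_max?_id_eq_some_iff hours H).1 hH
  obtain ⟨hMm, hMb⟩ := (pv_max?_id_eq_some_iff minutes M).1 hM
  rw [pv_max?_id_eq_some_iff]
  constructor
  · rw [List.mem_flatMap]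
    exact ⟨H, hHm, List.mem_map.2 ⟨M, hMm, rfl⟩⟩
  · intro y hy
    rw [List.mem_flatMap] at hy
    obtain ⟨h, hh, hy⟩ := hy
    rw [List.mem_map] at hy
    obtain ⟨m, hm, rfl⟩ := hy
    have := hHb h hh
    have := hMb m hm
    omega

-- ===== VERDICT (by name: the statement is the Claim_ definition above) =====
theorem get_cron_last_minutes_py_spec : Claim_equal_get_cron_last_minutes_py := by
  intro expression _
  unfold Spec_get_cron_last_minutes_py
  cases expression with
  | none => rfl
  | some s =>
    simp only [get_cron_last_minutes_py, get_cron_last_minutes_py_alt]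
    by_cases hs : s = ""
    · rw [if_pos hs, if_pos hs]
    · rw [if_neg hs, if_neg hs]
      by_cases hlen : (PySem.Str.split₀ s).length < 2
      · rw [if_pos hlen, if_pos hlen]
      · rw [if_neg hlen, if_neg hlen]
        have hmin := pv_field (PySem.List.pyGetD (PySem.Str.split₀ s) 0 "") 0 59
        have hhr := pv_field (PySem.List.pyGetD (PySem.Str.split₀ s) 1 "") 0 23
        cases hM : pvLatestMatch (PySem.List.pyGetD (PySem.Str.split₀ s) 0 "") 0 59 with
        | none =>
          rw [hM, PySem.List.max?_eq_none_iff] at hmin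
          rw [if_pos (Or.inl hmin)]
        | some M =>
          cases hH : pvLatestMatch (PySem.List.pyGetD (PySem.Str.split₀ s) 1 "") 0 23 with
          | none =>
            rw [hH, PySem.List.max?_eq_none_iff] at hhr
            rw [if_pos (Or.inr hhr)]
          | some H =>
            rw [hM] at hmin
            rw [hH] at hhr
            have hmne : pvParseCronField (PySem.List.pyGetD (PySem.Str.split₀ s) 0 "") 0 59 ≠ [] := by
              intro h
              rw [h] at hmin
              rw [(PySem.List.max?_eq_none_iff ([] : List Int) (fun x => x)).2 rfl] at hmin
              simp at hmin
            have hhne : pvParseCronField (PySem.List.pyGetD (PySem.Str.split₀ s) 1 "") 0 23 ≠ [] := by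
              intro h
              rw [h] at hhr
              rw [(PySem.List.max?_eq_none_iff ([] : List Int) (fun x => x)).2 rfl] at hhr
              simp at hhr
            rw [if_neg (by simp [hmne, hhne]), pv_flat_max _ _ H M hhr hmin]
            rfl
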